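-- pv_equiv track=rewrite | github.com/alvaroreyb/TFM | train_recurrence_classifier+neg.py | is_negation_affecting_recurrence
-- ===== SOURCE A (Python) =====
-- NEGATION_SCOPE_WINDOW = 50
--
-- def is_negation_affecting_recurrence(span, negation_entities, window=NEGATION_SCOPE_WINDOW):
--     """
--     Verificar si la negación detectada afecta realmente a keywords de recurrencia
--     Busca keywords de recurrencia dentro de una ventana de carácteres de cada negación
--     """
--     if not negation_entities:
--         return False
--
--     span_lower = span.lower()
--
--     recurrence_keywords = [
--         'progresión', 'progresion', 'avance', 'empeoramiento', 'evolución desfavorable',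
--         'recurrencia', 'recidiva', 'recaída', 'recaida', 'reaparición', 'reaparicion',
--         'nueva lesión', 'nuevo nódulo', 'nueva masa', 'nuevas lesiones', 'nuevos nódulos',
--         'metástasis', 'metastasis', 'mts', 'diseminación', 'diseminacion',
--         'deterioro', 'incremento', 'aumento', 'crecimiento',
--         'mayor tamaño', 'más grande', 'crece', 'crecido', 'aumentado',
--         'nueva', 'nuevo', 'nuevas', 'nuevos',
--         'lesión', 'lesion', 'nódulo', 'nodulo', 'masa'
--     ]
--
--     for neg_ent in negation_entities:
--         neg_start = neg_ent.get('start', 0)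
--         neg_end = neg_ent.get('end', 0)
--         window_start = max(0, neg_start - window)
--         window_end = min(len(span), neg_end + window)
--         window_text = span_lower[window_start:window_end]
--         if any(keyword in window_text for keyword in recurrence_keywords):
--             return True
--
--     return False
-- ===== SOURCE B (Python) =====
-- NEGATION_SCOPE_WINDOW = 50
--
-- RECURRENCE_KEYWORDS = [
--     'progresión', 'progresion', 'avance', 'empeoramiento', 'evolución desfavorable',
--     'recurrencia', 'recidiva', 'recaída', 'recaida', 'reaparición', 'reaparicion',
--     'nueva lesión', 'nuevo nódulo', 'nueva masa', 'nuevas lesiones', 'nuevos nódulos',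
--     'metástasis', 'metastasis', 'mts', 'diseminación', 'diseminacion',
--     'deterioro', 'incremento', 'aumento', 'crecimiento',
--     'mayor tamaño', 'más grande', 'crece', 'crecido', 'aumentado',
--     'nueva', 'nuevo', 'nuevas', 'nuevos',
--     'lesión', 'lesion', 'nódulo', 'nodulo', 'masa'
-- ]
--
--
-- def is_negation_affecting_recurrence(span, negation_entities, window=NEGATION_SCOPE_WINDOW):
--     if not negation_entities:
--         return False
--
--     span_lower = span.lower()
--
--     # Record every keyword occurrence once, as a (start, end) interval.
--     hits = [(p, p + len(kw))
--             for kw in RECURRENCE_KEYWORDS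
--             for p in range(len(span_lower) - len(kw) + 1)
--             if span_lower.startswith(kw, p)]
--
--     for neg_ent in negation_entities:
--         neg_start = neg_ent.get('start', 0)
--         neg_end = neg_ent.get('end', 0)
--         for h_start, h_end in hits:
--             if neg_start - window <= h_start and h_end <= neg_end + window:
--                 return True
--
--     return False
-- ===== Notes on version B (the rewrite author's own statement) =====
-- stated objective: alternative
-- what changed: Instead of slicing the span around each negation and re-scanning the slice for every keyword, B scans span.lower() once, records every keyword occurrence as a (start,end) interval, and tests each negation window by interval containment.
-- outside the precondition, e.g. on is_negation_affecting_recurrence(' masa ', [{'start': 0, 'end': 0}], -1): A returns True, B returns False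
import Mathlib
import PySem

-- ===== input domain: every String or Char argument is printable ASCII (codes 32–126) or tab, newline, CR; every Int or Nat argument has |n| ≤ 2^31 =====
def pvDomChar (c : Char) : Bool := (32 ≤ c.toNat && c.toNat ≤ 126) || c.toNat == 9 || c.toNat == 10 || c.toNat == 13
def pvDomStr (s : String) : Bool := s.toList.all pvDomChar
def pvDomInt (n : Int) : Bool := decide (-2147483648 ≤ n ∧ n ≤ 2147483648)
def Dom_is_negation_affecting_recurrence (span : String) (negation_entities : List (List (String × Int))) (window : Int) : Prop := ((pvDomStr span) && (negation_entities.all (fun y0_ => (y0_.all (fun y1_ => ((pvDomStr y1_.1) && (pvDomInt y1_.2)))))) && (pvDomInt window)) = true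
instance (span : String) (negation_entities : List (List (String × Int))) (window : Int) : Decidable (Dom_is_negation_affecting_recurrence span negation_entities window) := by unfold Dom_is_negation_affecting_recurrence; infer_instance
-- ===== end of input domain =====

-- B precomputes all keyword-occurrence intervals of span.lower() once and tests each negation window by
-- interval containment, instead of A's per-entity slicing and substring re-scan (objective: alternative).

-- the recurrence_keywords constant shared by both Pythons
def pvKeywords : List String :=
  ["progresión", "progresion", "avance", "empeoramiento", "evolución desfavorable",
   "recurrencia", "recidiva", "recaída", "recaida", "reaparición", "reaparicion",
   "nueva lesión", "nuevo nódulo", "nueva masa", "nuevas lesiones", "nuevos nódulos",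
   "metástasis", "metastasis", "mts", "diseminación", "diseminacion",
   "deterioro", "incremento", "aumento", "crecimiento",
   "mayor tamaño", "más grande", "crece", "crecido", "aumentado",
   "nueva", "nuevo", "nuevas", "nuevos",
   "lesión", "lesion", "nódulo", "nodulo", "masa"]

-- ===== PORT A =====
-- body of A's `for neg_ent in negation_entities` loop (returns the value of the `any(...)` test)
def pvEntityA (span : String) (window : Int) (neg_ent : List (String × Int)) : Bool :=
  let d := PySem.Dict.ofList neg_ent
  let neg_start := d.getD "start" 0
  let neg_end := d.getD "end" 0
  let window_start := max 0 (neg_start - window)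
  let window_end := min ((PySem.Str.len span : Int)) (neg_end + window)
  let window_text := PySem.Str.slice (PySem.Str.lower span) (some window_start) (some window_end)
  pvKeywords.any (fun keyword => PySem.Str.isIn keyword window_text)

def is_negation_affecting_recurrence (span : String) (negation_entities : List (List (String × Int))) (window : Int) : Bool :=
  if negation_entities.isEmpty then false
  else negation_entities.any (pvEntityA span window)

-- ===== PORT B =====
-- all occurrence intervals (p, p + len kw) of one keyword in span_lower; `span_lower.startswith(kw, p)`
-- with 0 ≤ p is ported exactly as "kw is a prefix of span_lower after dropping p characters"
def pvHits (span_lower : List Char) (kw : List Char) : List (Int × Int) :=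
  ((PySem.List.pyRange 0 ((span_lower.length : Int) - (kw.length : Int) + 1) 1).filter
      (fun p => PySem.Chars.startswith (span_lower.drop p.toNat) kw)).map
    (fun p => (p, p + (kw.length : Int)))

-- body of B's `for neg_ent in negation_entities` loop
def pvEntityB (hits : List (Int × Int)) (window : Int) (neg_ent : List (String × Int)) : Bool :=
  let d := PySem.Dict.ofList neg_ent
  let neg_start := d.getD "start" 0
  let neg_end := d.getD "end" 0
  hits.any (fun h => decide (neg_start - window ≤ h.1) && decide (h.2 ≤ neg_end + window))

def is_negation_affecting_recurrence_alt (span : String) (negation_entities : List (List (String × Int))) (window : Int) : Bool :=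
  if negation_entities.isEmpty then false
  else
    let span_lower := (PySem.Str.lower span).toList
    let hits := pvKeywords.flatMap (fun kw => pvHits span_lower kw.toList)
    negation_entities.any (pvEntityB hits window)

-- ===== PRECONDITION & SPEC =====
-- Pre_ excludes inputs where, for some negation entity, end+window is negative while the slice
-- span_lower[max(0,start-window) : end+window] is nonempty under Python's negative-index rule: there A
-- scans an accidental wrapped-around region of the span (a negative character window is outside the
-- function's natural domain); B's interval-containment test naturally treats such a window as empty.
def Pre_is_negation_affecting_recurrence (span : String) (negation_entities : List (List (String × Int))) (window : Int) : Prop :=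
  ∀ d ∈ negation_entities,
    0 ≤ (PySem.Dict.ofList d).getD "end" 0 + window ∨
    (PySem.Str.len span : Int) + (PySem.Dict.ofList d).getD "end" 0 + window ≤
      max 0 ((PySem.Dict.ofList d).getD "start" 0 - window)
instance (span : String) (negation_entities : List (List (String × Int))) (window : Int) : Decidable (Pre_is_negation_affecting_recurrence span negation_entities window) := by unfold Pre_is_negation_affecting_recurrence; infer_instance

def pvWitness_is_negation_affecting_recurrence : String × (List (List (String × Int))) × Int :=
  ("no recidiva tumoral", [[("start", 0), ("end", 2)]], 50)

def Spec_is_negation_affecting_recurrence (span : String) (negation_entities : List (List (String × Int))) (window : Int) (out : Bool) : Prop := out = is_negation_affecting_recurrence_alt span negation_entities window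
instance (span : String) (negation_entities : List (List (String × Int))) (window : Int) (out : Bool) : Decidable (Spec_is_negation_affecting_recurrence span negation_entities window out) := by unfold Spec_is_negation_affecting_recurrence; infer_instance

-- ===== CLAIM (what is proved, stated in full; the proofs are below) =====
def Claim_equal_is_negation_affecting_recurrence : Prop := ∀ (span : String) (negation_entities : List (List (String × Int))) (window : Int), Dom_is_negation_affecting_recurrence span negation_entities window → Pre_is_negation_affecting_recurrence span negation_entities window → Spec_is_negation_affecting_recurrence span negation_entities window (is_negation_affecting_recurrence span negation_entities window)

-- ===== LEMMAS AND PROOFS =====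

-- membership in the hit list of one keyword, spelled out
lemma mem_pvHits {sl kw : List Char} {h : Int × Int} :
    h ∈ pvHits sl kw ↔ ∃ p : Int, 0 ≤ p ∧ p < (sl.length : Int) - (kw.length : Int) + 1 ∧
      kw <+: sl.drop p.toNat ∧ h = (p, p + (kw.length : Int)) := by
  simp only [pvHits, List.mem_map, List.mem_filter, PySem.List.mem_pyRange_one,
    PySem.Chars.startswith_iff]
  constructor
  · rintro ⟨p, ⟨⟨h0, h1⟩, h2⟩, rfl⟩
    exact ⟨p, h0, h1, h2, rfl⟩
  · rintro ⟨p, h0, h1, h2, rfl⟩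
    exact ⟨p, ⟨⟨h0, h1⟩, h2⟩, rfl⟩

lemma kw_occ (sl kw : List Char) (hkw : kw ≠ []) (ns ne w : Int)
    (hpre : 0 ≤ ne + w ∨ (sl.length : Int) + ne + w ≤ max 0 (ns - w)) :
    PySem.Chars.isIn kw (PySem.List.slice sl (some (max 0 (ns - w))) (some (min (sl.length : Int) (ne + w)))) =
      (pvHits sl kw).any (fun h => decide (ns - w ≤ h.1) && decide (h.2 ≤ ne + w)) := by
  have hkwlen : 0 < kw.length := List.length_pos_iff.mpr hkw
  rw [Bool.eq_iff_iff]
  by_cases hb : 0 ≤ ne + w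
  · have ha : (0:Int) ≤ max 0 (ns - w) := le_max_left _ _
    have hbmin : (0:Int) ≤ min (sl.length : Int) (ne + w) := le_min (Int.natCast_nonneg _) hb
    rw [PySem.List.slice_toNat _ ha hbmin]
    set aN := (max 0 (ns - w)).toNat with haN
    set bN := (min (sl.length : Int) (ne + w)).toNat with hbN
    have haC : (aN : Int) = max 0 (ns - w) := Int.toNat_of_nonneg ha
    have hbC : (bN : Int) = min (sl.length : Int) (ne + w) := Int.toNat_of_nonneg hbmin
    rw [← PySem.Chars.exists_prefix_drop_iff_isIn]
    simp only [List.any_eq_true, mem_pvHits, Bool.and_eq_true, decide_eq_true_eq]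
    constructor
    · rintro ⟨j, hj⟩
      rw [List.drop_take, List.drop_drop] at hj
      rw [List.prefix_take_iff] at hj
      obtain ⟨hpref, hlen⟩ := hj
      have hlb : kw.length ≤ sl.length - (aN + j) := by
        have := hpref.length_le
        simpa using this
      refine ⟨(((aN + j : Nat) : Int), ((aN + j : Nat) : Int) + kw.length),
        ⟨((aN + j : Nat) : Int), by positivity, ?_, ?_, rfl⟩, ?_, ?_⟩
      · push_cast; omega
      · have hdn : (((aN + j : Nat) : Int)).toNat = aN + j := by omega
        rw [hdn]; exact hpref
      · push_cast; omega
      · push_cast; omega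
    · rintro ⟨h, ⟨p, hp0, hplt, hpref, rfl⟩, hc1, hc2⟩
      set pN := p.toNat with hpN
      have hpC : (pN : Int) = p := Int.toNat_of_nonneg hp0
      have hlb : kw.length ≤ sl.length - pN := by
        have := hpref.length_le
        simpa using this
      refine ⟨pN - aN, ?_⟩
      rw [List.drop_take, List.drop_drop]
      have hle : aN ≤ pN := by omega
      have heq : aN + (pN - aN) = pN := by omega
      rw [heq, List.prefix_take_iff]
      exact ⟨hpref, by omega⟩
  · have hwrap : (sl.length : Int) + ne + w ≤ max 0 (ns - w) := hpre.resolve_left hb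
    have hnil : PySem.List.slice sl (some (max 0 (ns - w))) (some (min (sl.length : Int) (ne + w))) = ([] : List Char) := by
      have hcl : PySem.List.clampIdx sl.length (min (sl.length : Int) (ne + w)) ≤
          PySem.List.clampIdx sl.length (max 0 (ns - w)) := by
        simp only [PySem.List.clampIdx]
        split_ifs <;> omega
      have hlen := PySem.List.length_slice sl (max 0 (ns - w)) (min (sl.length : Int) (ne + w))
      have h0 : (PySem.List.slice sl (some (max 0 (ns - w))) (some (min (sl.length : Int) (ne + w)))).length = 0 := by omega
      exact List.eq_nil_of_length_eq_zero h0
    rw [hnil]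
    simp only [List.any_eq_true, mem_pvHits, Bool.and_eq_true, decide_eq_true_eq]
    constructor
    · intro hin
      exact absurd (List.eq_nil_of_infix_nil ((PySem.Chars.isIn_iff_infix _ _).mp hin)) hkw
    · rintro ⟨h, ⟨p, hp0, _, _, rfl⟩, _, hc2⟩
      simp only at hc2
      omega

-- one negation entity: A's test equals B's test (given the Pre_ disjunct for this entity)
lemma entity_eq (span : String) (window : Int) (neg_ent : List (String × Int))
    (hpre : 0 ≤ (PySem.Dict.ofList neg_ent).getD "end" 0 + window ∨
      (PySem.Str.len span : Int) + (PySem.Dict.ofList neg_ent).getD "end" 0 + window ≤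
        max 0 ((PySem.Dict.ofList neg_ent).getD "start" 0 - window)) :
    pvEntityA span window neg_ent =
      pvEntityB (pvKeywords.flatMap (fun kw => pvHits (PySem.Str.lower span).toList kw.toList)) window neg_ent := by
  have hkwne : ∀ kw ∈ pvKeywords, kw.toList ≠ [] := by decide
  unfold pvEntityA pvEntityB
  rw [List.any_flatMap]
  apply PySem.List.any_congr_mem
  intro kw hkw
  simp only [PySem.Str.isIn_eq, PySem.Str.toList_slice, PySem.Chars.slice_eq_listSlice]
  have hlen : ((PySem.Str.lower span).toList.length : Int) = (PySem.Str.len span : Int) := by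
    simp only [PySem.Str.toList_lower, PySem.Chars.lower, List.length_map, String.length_toList,
      PySem.Str.len_eq]
  rw [← hlen] at hpre ⊢
  exact kw_occ (PySem.Str.lower span).toList kw.toList (hkwne kw hkw) _ _ window hpre

-- ===== VERDICT (by name: the statement is the Claim_ definition above) =====
theorem is_negation_affecting_recurrence_spec : Claim_equal_is_negation_affecting_recurrence := by
  intro span env w _hdom hpre
  unfold Spec_is_negation_affecting_recurrence is_negation_affecting_recurrence is_negation_affecting_recurrence_alt
  cases hE : env.isEmpty
  · simp only [Bool.false_eq_true, if_false]
    exact PySem.List.any_congr_mem (fun d hd => entity_eq span w d (hpre d hd))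
  · simp
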